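-- pv_equiv track=rewrite | github.com/XUANTIE-RV/tvm | thead/hhb/core/profiler_manage.py | get_mem_total_info
-- ===== SOURCE A (Python) =====
-- def get_mem_total_info(data):
--     """Get total information of memory from origin data
--
--     Parameters
--     ----------
--     data : list[dict[str, dict[str, object]]]
--         Original data
--
--     res : dict
--         Total information
--     """
--     res = {
--         "params": 0,
--         "output": 0,
--         "accum_ddr": 0,
--         "coeff_ddr": 0,
--         "input_ddr": 0,
--         "output_ddr": 0,
--     }
--     for d in data:
--         inner_data = d["memory"]
--         for k, v in inner_data.items():
--             if k in res:
--                 res[k] += v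
--     return res
-- ===== SOURCE B (Python) =====
-- def get_mem_total_info(data):
--     keys = ("params", "output", "accum_ddr", "coeff_ddr", "input_ddr", "output_ddr")
--     return {k: sum(d["memory"].get(k, 0) for d in data) for k in keys}
-- ===== Notes on version B (the rewrite author's own statement) =====
-- stated objective: idiomatic
-- what changed: Transposed the traversal: instead of one pass over the data with an inner membership-guarded accumulator dict, B loops over the six fixed keys on the outside and sums d['memory'].get(k, 0) across the data for each key, built as a dict comprehension.
import Mathlib
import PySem

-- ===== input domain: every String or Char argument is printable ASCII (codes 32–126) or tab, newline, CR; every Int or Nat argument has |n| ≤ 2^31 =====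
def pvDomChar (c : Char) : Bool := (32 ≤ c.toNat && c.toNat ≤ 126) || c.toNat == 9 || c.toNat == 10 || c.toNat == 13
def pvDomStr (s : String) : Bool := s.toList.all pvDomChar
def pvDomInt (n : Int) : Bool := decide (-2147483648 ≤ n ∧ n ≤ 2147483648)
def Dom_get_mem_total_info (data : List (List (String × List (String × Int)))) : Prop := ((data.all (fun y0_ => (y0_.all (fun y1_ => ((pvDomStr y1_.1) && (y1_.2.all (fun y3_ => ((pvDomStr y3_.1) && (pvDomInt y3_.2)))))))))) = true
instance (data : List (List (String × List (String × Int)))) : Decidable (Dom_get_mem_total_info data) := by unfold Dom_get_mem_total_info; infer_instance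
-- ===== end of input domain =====

-- B transposes the traversal (outer loop over the six fixed keys, per-key sum over the data); same values, stated as an idiomatic alternative, not faster.


-- shared helper: d["memory"] (first match; [] stands in where Python raises KeyError, excluded by Pre_)
def pvMemory (d : List (String × List (String × Int))) : List (String × Int) :=
  ((d.find? (fun p => p.1 == "memory")).map Prod.snd).getD []

-- ===== PORT A =====
-- 'if k in res: res[k] += v' — membership test, then in-place update of the matching entry
def pvStep (res : List (String × Int)) (kv : String × Int) : List (String × Int) :=
  if res.any (fun p => p.1 == kv.1) then
    res.map (fun p => if p.1 == kv.1 then (p.1, p.2 + kv.2) else p)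
  else res

def get_mem_total_info (data : List (List (String × List (String × Int)))) : List (String × Int) :=
  data.foldl (fun res d => (pvMemory d).foldl pvStep res)
    [("params", 0), ("output", 0), ("accum_ddr", 0), ("coeff_ddr", 0), ("input_ddr", 0), ("output_ddr", 0)]

-- ===== PORT B =====
-- inner dict .get(k, 0)
def pvGet0 (m : List (String × Int)) (k : String) : Int :=
  ((m.find? (fun p => p.1 == k)).map Prod.snd).getD 0

def get_mem_total_info_alt (data : List (List (String × List (String × Int)))) : List (String × Int) :=
  ["params", "output", "accum_ddr", "coeff_ddr", "input_ddr", "output_ddr"].map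
    (fun k => (k, data.foldl (fun s d => s + pvGet0 (pvMemory d) k) 0))

-- ===== PRECONDITION & SPEC =====
-- Pre_ excludes inputs where A raises KeyError (an entry without a "memory" key) and assoc
-- lists with duplicate keys inside an inner memory dict, which do not encode any Python dict.
def Pre_get_mem_total_info (data : List (List (String × List (String × Int)))) : Prop :=
  ∀ d ∈ data, (d.any (fun p => p.1 == "memory")) = true ∧ ∀ p ∈ d, (p.2.map Prod.fst).Nodup
instance (data : List (List (String × List (String × Int)))) : Decidable (Pre_get_mem_total_info data) := by unfold Pre_get_mem_total_info; infer_instance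
def pvWitness_get_mem_total_info : (List (List (String × List (String × Int)))) :=
  [[("memory", [("params", 1), ("foo", 2)])]]

def Spec_get_mem_total_info (data : List (List (String × List (String × Int)))) (out : List (String × Int)) : Prop := out = get_mem_total_info_alt data
instance (data : List (List (String × List (String × Int)))) (out : List (String × Int)) : Decidable (Spec_get_mem_total_info data out) := by unfold Spec_get_mem_total_info; infer_instance

-- ===== CLAIM (what is proved, stated in full; the proofs are below) =====
def Claim_equal_get_mem_total_info : Prop := ∀ (data : List (List (String × List (String × Int)))), Dom_get_mem_total_info data → Pre_get_mem_total_info data → Spec_get_mem_total_info data (get_mem_total_info data)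

-- ===== LEMMAS AND PROOFS =====

-- sum of ALL occurrences of key k in an assoc list (what A's inner loop adds for key k)
def pvKeySum (m : List (String × Int)) (k : String) : Int :=
  match m with
  | [] => 0
  | p :: t => (if p.1 = k then p.2 else 0) + pvKeySum t k

-- per-key totals over the data, A-style (all occurrences) and B-style (first match)
def pvTotS (data : List (List (String × List (String × Int)))) (k : String) : Int :=
  match data with
  | [] => 0
  | d :: t => pvKeySum (pvMemory d) k + pvTotS t k

def pvTot (data : List (List (String × List (String × Int)))) (k : String) : Int :=
  match data with
  | [] => 0
  | d :: t => pvGet0 (pvMemory d) k + pvTot t k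

lemma pvKeySum_of_not_mem (m : List (String × Int)) (k : String)
    (h : k ∉ m.map Prod.fst) : pvKeySum m k = 0 := by
  induction m with
  | nil => rfl
  | cons p t ih =>
    simp only [List.map_cons, List.mem_cons, not_or] at h
    simp [pvKeySum, (Ne.symm h.1 : ¬ p.1 = k), ih h.2]

lemma pvKeySum_eq_pvGet0 (m : List (String × Int)) (k : String)
    (h : (m.map Prod.fst).Nodup) : pvKeySum m k = pvGet0 m k := by
  induction m with
  | nil => rfl
  | cons p t ih =>
    simp only [List.map_cons, List.nodup_cons] at h
    by_cases hk : p.1 = k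
    · have : pvKeySum t k = 0 := pvKeySum_of_not_mem t k (hk ▸ h.1)
      simp [pvKeySum, pvGet0, hk, this]
    · simp [pvKeySum, pvGet0, hk, ih h.2]

-- A's inner loop on the six-key state, characterised
lemma inner_char (m : List (String × Int)) (a b c e g h : Int) :
    m.foldl pvStep [("params", a), ("output", b), ("accum_ddr", c), ("coeff_ddr", e), ("input_ddr", g), ("output_ddr", h)]
      = [("params", a + pvKeySum m "params"), ("output", b + pvKeySum m "output"),
         ("accum_ddr", c + pvKeySum m "accum_ddr"), ("coeff_ddr", e + pvKeySum m "coeff_ddr"),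
         ("input_ddr", g + pvKeySum m "input_ddr"), ("output_ddr", h + pvKeySum m "output_ddr")] := by
  induction m generalizing a b c e g h with
  | nil => simp [pvKeySum]
  | cons p t ih =>
    obtain ⟨k0, v⟩ := p
    simp only [List.foldl_cons, pvStep, pvKeySum]
    by_cases h1 : k0 = "params"
    · subst h1; simp [ih, add_assoc]
    by_cases h2 : k0 = "output"
    · subst h2; simp [ih, add_assoc]
    by_cases h3 : k0 = "accum_ddr"
    · subst h3; simp [ih, add_assoc]
    by_cases h4 : k0 = "coeff_ddr"
    · subst h4; simp [ih, add_assoc]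
    by_cases h5 : k0 = "input_ddr"
    · subst h5; simp [ih, add_assoc]
    by_cases h6 : k0 = "output_ddr"
    · subst h6; simp [ih, add_assoc]
    · have n1 : ¬("params" = k0) := fun h => h1 h.symm
      have n2 : ¬("output" = k0) := fun h => h2 h.symm
      have n3 : ¬("accum_ddr" = k0) := fun h => h3 h.symm
      have n4 : ¬("coeff_ddr" = k0) := fun h => h4 h.symm
      have n5 : ¬("input_ddr" = k0) := fun h => h5 h.symm
      have n6 : ¬("output_ddr" = k0) := fun h => h6 h.symm
      simp [h1, h2, h3, h4, h5, h6, n1, n2, n3, n4, n5, n6, ih]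

lemma outer_char (data : List (List (String × List (String × Int)))) (a b c e g h : Int) :
    data.foldl (fun res d => (pvMemory d).foldl pvStep res)
      [("params", a), ("output", b), ("accum_ddr", c), ("coeff_ddr", e), ("input_ddr", g), ("output_ddr", h)]
      = [("params", a + pvTotS data "params"), ("output", b + pvTotS data "output"),
         ("accum_ddr", c + pvTotS data "accum_ddr"), ("coeff_ddr", e + pvTotS data "coeff_ddr"),
         ("input_ddr", g + pvTotS data "input_ddr"), ("output_ddr", h + pvTotS data "output_ddr")] := by
  induction data generalizing a b c e g h with
  | nil => simp [pvTotS]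
  | cons d t ih =>
    simp only [List.foldl_cons, inner_char, ih, pvTotS]
    simp [add_assoc]

lemma b_foldl_char (data : List (List (String × List (String × Int)))) (k : String) (s0 : Int) :
    data.foldl (fun s d => s + pvGet0 (pvMemory d) k) s0 = s0 + pvTot data k := by
  induction data generalizing s0 with
  | nil => simp [pvTot]
  | cons d t ih => simp only [List.foldl_cons, ih, pvTot]; ring

lemma totS_eq_tot (data : List (List (String × List (String × Int))))
    (hp : Pre_get_mem_total_info data) (k : String) : pvTotS data k = pvTot data k := by
  induction data with
  | nil => rfl
  | cons d t ih =>
    have hd := hp d (by simp)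
    have hnd : ((pvMemory d).map Prod.fst).Nodup := by
      unfold pvMemory
      cases hf : d.find? (fun p => p.1 == "memory") with
      | none => simp
      | some p =>
        have hmem : p ∈ d := List.mem_of_find?_eq_some hf
        simpa using (hd.2 p hmem)
    have ht : Pre_get_mem_total_info t := fun x hx => hp x (by simp [hx])
    simp [pvTotS, pvTot, pvKeySum_eq_pvGet0 _ _ hnd, ih ht]

-- ===== VERDICT (by name: the statement is the Claim_ definition above) =====
theorem get_mem_total_info_spec : Claim_equal_get_mem_total_info := by
  intro data _ hp
  unfold Spec_get_mem_total_info get_mem_total_info get_mem_total_info_alt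
  rw [outer_char]
  simp [b_foldl_char, totS_eq_tot data hp]
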